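-- pv_equiv track=rewrite | github.com/JeromeLefebvre/ProjectEuler | Python/Problem090.py | representsSquares
-- ===== SOURCE A (Python) =====
-- def representsSquares(A,B):
-- 	seen = set()
-- 	if 6 in A:
-- 		A += (9,)
-- 	if 9 in A:
-- 		A += (6,)
-- 	if 6 in B:
-- 		B += (9,)
-- 	if 9 in B:
-- 		B += (6,)
-- 	for a in A:
-- 		for b in B:
-- 			seen.add(a*10 + b)
-- 			seen.add(b*10 + a)
-- 	return {n**2 for n in range(1,10)} <= seen
-- ===== SOURCE B (Python) =====
-- SQUARES = (1, 4, 9, 16, 25, 36, 49, 64, 81)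
--
-- def _canonical(faces):
--     s = set(faces)
--     if 6 in s or 9 in s:
--         s = s | {6, 9}
--     return s
--
-- def representsSquares(A, B):
--     sa = _canonical(A)
--     sb = _canonical(B)
--     return all(any(sq - 10 * a in sb for a in sa) or
--                any(sq - 10 * b in sa for b in sb)
--                for sq in SQUARES)
-- ===== Notes on version B (the rewrite author's own statement) =====
-- stated objective: faster
-- what changed: Instead of materialising the full set of all two-digit combinations of the two (6/9-augmented) dice and testing the nine squares as a subset, B canonicalises each die into a set once and checks each of the nine squares directly: a square sq is formable iff some face a of one die has sq - 10*a in the other die's set, in either order.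
import Mathlib
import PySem

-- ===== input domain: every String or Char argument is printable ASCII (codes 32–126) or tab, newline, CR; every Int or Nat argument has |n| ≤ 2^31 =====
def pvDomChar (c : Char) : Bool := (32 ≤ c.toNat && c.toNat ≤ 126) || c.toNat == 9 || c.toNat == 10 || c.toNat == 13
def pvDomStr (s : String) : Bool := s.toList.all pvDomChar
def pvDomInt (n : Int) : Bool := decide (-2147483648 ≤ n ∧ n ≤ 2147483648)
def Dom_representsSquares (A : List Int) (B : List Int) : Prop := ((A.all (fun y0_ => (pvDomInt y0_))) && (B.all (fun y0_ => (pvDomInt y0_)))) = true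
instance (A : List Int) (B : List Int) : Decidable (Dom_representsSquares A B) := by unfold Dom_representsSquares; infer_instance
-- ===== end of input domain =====

-- B checks each of the nine target squares directly against canonicalised face sets instead of
-- materialising the full product set; equivalence is about the return value (A rebinds its tuple
-- parameters locally, nothing is mutated).

-- ===== PORT A =====
def representsSquares (A : List Int) (B : List Int) : Bool :=
  -- seen = set(); the four conditional appends; the nested loop; the subset test
  let A1 := if A.contains 6 then A ++ [9] else A
  let A2 := if A1.contains 9 then A1 ++ [6] else A1
  let B1 := if B.contains 6 then B ++ [9] else B
  let B2 := if B1.contains 9 then B1 ++ [6] else B1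
  let seen : PySem.Set Int :=
    A2.foldl (fun s a =>
      B2.foldl (fun s b =>
        PySem.Set.add (PySem.Set.add s (a * 10 + b)) (b * 10 + a)) s)
      PySem.Set.empty
  PySem.Set.issubset
    (PySem.Set.ofList ((PySem.List.pyRange 1 10 1).map (fun n => n ^ 2))) seen

-- ===== PORT B =====
def pvCanonical (faces : List Int) : PySem.Set Int :=
  let s := PySem.Set.ofList faces
  if PySem.Set.contains s 6 || PySem.Set.contains s 9 then
    PySem.Set.union s (PySem.Set.ofList [6, 9])
  else s

def representsSquares_alt (A : List Int) (B : List Int) : Bool :=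
  let sa := pvCanonical A
  let sb := pvCanonical B
  ([1, 4, 9, 16, 25, 36, 49, 64, 81] : List Int).all (fun sq =>
    sa.any (fun a => PySem.Set.contains sb (sq - 10 * a)) ||
    sb.any (fun b => PySem.Set.contains sa (sq - 10 * b)))

-- ===== PRECONDITION & SPEC =====
def Spec_representsSquares (A : List Int) (B : List Int) (out : Bool) : Prop := out = representsSquares_alt A B
instance (A : List Int) (B : List Int) (out : Bool) : Decidable (Spec_representsSquares A B out) := by unfold Spec_representsSquares; infer_instance

-- ===== CLAIM (what is proved, stated in full; the proofs are below) =====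
def Claim_equal_representsSquares : Prop := ∀ (A : List Int) (B : List Int), Dom_representsSquares A B → Spec_representsSquares A B (representsSquares A B)

-- ===== LEMMAS AND PROOFS =====

-- membership in the augmented face list (the two conditional appends)
theorem pv_mem_aug (A : List Int) (x : Int) :
    (x ∈ (if 9 ∈ (if 6 ∈ A then A ++ [9] else A)
            then (if 6 ∈ A then A ++ [9] else A) ++ [6]
            else (if 6 ∈ A then A ++ [9] else A)))
      ↔ x ∈ A ∨ ((6 ∈ A ∨ 9 ∈ A) ∧ (x = 6 ∨ x = 9)) := by
  by_cases h6 : (6 : Int) ∈ A <;> by_cases h9 : (9 : Int) ∈ A <;>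
    simp [h6, h9]
  · tauto
  · tauto
  · constructor
    · rintro (h | h)
      · exact Or.inl h
      · exact Or.inr (Or.inl h)
    · rintro (h | h | h)
      · exact Or.inl h
      · exact Or.inr h
      · exact Or.inl (h ▸ h9)

-- membership in B's canonical set coincides with the augmented list
theorem pv_mem_canonical (A : List Int) (x : Int) :
    x ∈ pvCanonical A ↔ x ∈ A ∨ ((6 ∈ A ∨ 9 ∈ A) ∧ (x = 6 ∨ x = 9)) := by
  unfold pvCanonical
  by_cases h6 : (6 : Int) ∈ A <;> by_cases h9 : (9 : Int) ∈ A <;>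
    simp [h6, h9, PySem.Set.contains, List.contains_eq_mem, PySem.Set.mem_union,
      PySem.Set.mem_ofList]

-- membership in the inner fold of A's product loop
theorem pv_mem_inner (B2 : List Int) (a x : Int) (s : PySem.Set Int) :
    (x ∈ B2.foldl (fun s b => PySem.Set.add (PySem.Set.add s (a * 10 + b)) (b * 10 + a)) s)
      ↔ x ∈ s ∨ ∃ b ∈ B2, x = a * 10 + b ∨ x = b * 10 + a := by
  induction B2 generalizing s with
  | nil => simp
  | cons b bs ih =>
      simp only [List.foldl_cons, ih, PySem.Set.mem_add, List.mem_cons]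
      constructor
      · rintro (((h | h) | h) | ⟨c, hc, h⟩)
        · exact Or.inl h
        · exact Or.inr ⟨b, Or.inl rfl, Or.inl h⟩
        · exact Or.inr ⟨b, Or.inl rfl, Or.inr h⟩
        · exact Or.inr ⟨c, Or.inr hc, h⟩
      · rintro (h | ⟨c, (rfl | hc), h⟩)
        · exact Or.inl (Or.inl (Or.inl h))
        · rcases h with h | h
          · exact Or.inl (Or.inl (Or.inr h))
          · exact Or.inl (Or.inr h)
        · exact Or.inr ⟨c, hc, h⟩

-- membership in A's whole seen set
theorem pv_mem_seen (A2 B2 : List Int) (x : Int) :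
    (x ∈ A2.foldl (fun s a =>
        B2.foldl (fun s b => PySem.Set.add (PySem.Set.add s (a * 10 + b)) (b * 10 + a)) s)
        (PySem.Set.empty : PySem.Set Int))
      ↔ ∃ a ∈ A2, ∃ b ∈ B2, x = a * 10 + b ∨ x = b * 10 + a := by
  have main : ∀ (A2 : List Int) (s : PySem.Set Int),
      (x ∈ A2.foldl (fun s a =>
          B2.foldl (fun s b => PySem.Set.add (PySem.Set.add s (a * 10 + b)) (b * 10 + a)) s) s)
        ↔ x ∈ s ∨ ∃ a ∈ A2, ∃ b ∈ B2, x = a * 10 + b ∨ x = b * 10 + a := by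
    intro A2
    induction A2 with
    | nil => simp
    | cons a as ih =>
        intro s
        simp only [List.foldl_cons, ih, pv_mem_inner, List.mem_cons]
        constructor
        · rintro ((h | ⟨b, hb, h⟩) | ⟨c, hc, b, hb, h⟩)
          · exact Or.inl h
          · exact Or.inr ⟨a, Or.inl rfl, b, hb, h⟩
          · exact Or.inr ⟨c, Or.inr hc, b, hb, h⟩
        · rintro (h | ⟨c, (rfl | hc), b, hb, h⟩)
          · exact Or.inl (Or.inl h)
          · exact Or.inl (Or.inr ⟨b, hb, h⟩)
          · exact Or.inr ⟨c, hc, b, hb, h⟩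
  rw [main]
  simp [PySem.Set.empty]

theorem pv_main (A B : List Int) : representsSquares A B = representsSquares_alt A B := by
  rw [Bool.eq_iff_iff]
  unfold representsSquares representsSquares_alt
  simp only [PySem.Set.issubset, List.all_eq_true, List.any_eq_true, Bool.or_eq_true,
    PySem.Set.contains, List.contains_eq_mem, decide_eq_true_eq]
  constructor
  · intro h sq hsq
    have hs := h sq (by
      rw [PySem.Set.mem_ofList]
      fin_cases hsq <;> simp [PySem.List.pyRange] <;> decide)
    rw [pv_mem_seen] at hs
    obtain ⟨a, ha, b, hb, hab⟩ := hs
    rw [pv_mem_aug] at ha hb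
    rw [← pv_mem_canonical] at ha hb
    rcases hab with h1 | h1
    · exact Or.inl ⟨a, ha, by rw [h1, show a * 10 + b - 10 * a = b from by ring]; exact hb⟩
    · exact Or.inr ⟨b, hb, by rw [h1, show b * 10 + a - 10 * b = a from by ring]; exact ha⟩
  · intro h sq hsq
    rw [PySem.Set.mem_ofList] at hsq
    have hsq' : sq ∈ ([1, 4, 9, 16, 25, 36, 49, 64, 81] : List Int) := by
      have : (PySem.List.pyRange 1 10 1).map (fun n => n ^ 2)
          = ([1, 4, 9, 16, 25, 36, 49, 64, 81] : List Int) := by decide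
      rwa [this] at hsq
    have hs := h sq hsq'
    rw [pv_mem_seen]
    rcases hs with ⟨a, ha, hb⟩ | ⟨b, hb, ha⟩
    · rw [pv_mem_canonical, ← pv_mem_aug] at ha hb
      exact ⟨a, ha, sq - 10 * a, hb, Or.inl (by ring)⟩
    · rw [pv_mem_canonical, ← pv_mem_aug] at ha hb
      exact ⟨sq - 10 * b, ha, b, hb, Or.inr (by ring)⟩

-- ===== VERDICT (by name: the statement is the Claim_ definition above) =====
theorem representsSquares_spec : Claim_equal_representsSquares := by
  intro A B _
  unfold Spec_representsSquares
  exact pv_main A B
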